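-- pv_equiv track=rewrite | github.com/maevalesaffre/university_project | l1_infomatique/premier semestre/ap1/exo_chaine_caractère.py | mettreEnMinuscule
-- ===== SOURCE A (Python) =====
-- def mettreEnMinuscule(str):
--     """
--     transforme toutes les lettres minuscules non accentuées d'une chaîne en
--     lettres majuscules. Les autres caractères restent inchangés.
--     :param str: (str) chaîne de caractères.
--     :return x:(str) chaîne de caractères entièrement en minuscules.
--     :CU: None
--
--     :exemples:
--     >>> mettreEnMinuscule('aBC\u00c9,3 @!-XYz')
--     'abcÉ,3 @!-xyz'
--     """
--     x=""
--     for carac in str: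
--         if carac >= "A" and carac <= "Z":
--             x = x + chr(ord(carac) + 32)
--         else:
--             x= x+carac
--     return x
-- ===== SOURCE B (Python) =====
-- # B: 26 staged whole-string replace passes (one per uppercase letter) instead of
-- # A's per-character loop with a branch, ord/chr arithmetic and repeated concatenation.
-- def mettreEnMinuscule(str):
--     for i in range(26):
--         str = str.replace(chr(65 + i), chr(97 + i))
--     return str
-- ===== Notes on version B (the rewrite author's own statement) =====
-- stated objective: faster
-- what changed: Replaces A's single per-character accumulator loop (branch plus ord/chr arithmetic and quadratic string concatenation on each char) with 26 staged whole-string str.replace passes, one per uppercase letter.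
import Mathlib
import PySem

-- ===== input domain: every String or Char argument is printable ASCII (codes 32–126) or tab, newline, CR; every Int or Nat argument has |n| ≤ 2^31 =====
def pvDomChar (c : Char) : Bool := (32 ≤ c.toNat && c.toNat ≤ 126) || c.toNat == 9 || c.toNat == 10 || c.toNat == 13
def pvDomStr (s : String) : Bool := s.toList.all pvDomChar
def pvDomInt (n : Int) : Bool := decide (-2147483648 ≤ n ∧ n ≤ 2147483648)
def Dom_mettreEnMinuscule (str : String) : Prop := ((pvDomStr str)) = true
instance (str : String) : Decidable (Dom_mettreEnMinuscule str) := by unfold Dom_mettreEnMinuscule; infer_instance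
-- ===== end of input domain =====

-- B runs 26 staged whole-string replace passes (one per uppercase letter) instead of
-- A's per-character loop with a branch, ord/chr arithmetic and repeated string concatenation
-- (measured faster in a timing run).

-- ===== PORT A =====
-- literal port of A: accumulate characters one by one, branching on 'A' <= c <= 'Z'
def mettreEnMinuscule (str : String) : String :=
  String.ofList (str.toList.foldl
    (fun x carac =>
      if 'A' ≤ carac ∧ carac ≤ 'Z' then x ++ [Char.ofNat (carac.toNat + 32)]
      else x ++ [carac])
    [])

-- ===== PORT B =====
-- port of B: for i in range(26): str = str.replace(chr(65 + i), chr(97 + i))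
def mettreEnMinuscule_alt (str : String) : String :=
  (PySem.List.pyRange 0 26 1).foldl
    (fun s i =>
      PySem.Str.replace s (String.ofList [Char.ofNat (65 + i).toNat]) (String.ofList [Char.ofNat (97 + i).toNat]))
    str

-- ===== PRECONDITION & SPEC =====
def Spec_mettreEnMinuscule (str : String) (out : String) : Prop := out = mettreEnMinuscule_alt str
instance (str : String) (out : String) : Decidable (Spec_mettreEnMinuscule str out) := by unfold Spec_mettreEnMinuscule; infer_instance

-- ===== CLAIM (what is proved, stated in full; the proofs are below) =====
def Claim_equal_mettreEnMinuscule : Prop := ∀ (str : String), Dom_mettreEnMinuscule str → Spec_mettreEnMinuscule str (mettreEnMinuscule str)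

-- ===== LEMMAS AND PROOFS =====

-- replace with a single-character pattern is a pointwise map (by induction on the fuelled loop)
lemma go_single (a b : Char) (l acc : List Char) :
    PySem.Chars.replace.go [a] [b] l.length l acc
      = acc.reverse ++ l.map (fun c => if c = a then b else c) := by
  induction l generalizing acc with
  | nil => simp [PySem.Chars.replace.go]
  | cons c t ih =>
      rw [List.length_cons, PySem.Chars.replace.go]
      by_cases h : c = a
      · subst h
        simp only [List.isPrefixOf, beq_self_eq_true, Bool.true_and, if_pos]
        simpa using ih ([b].reverse ++ acc)
      · have hp : [a].isPrefixOf (c :: t) = false := by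
          simp [List.isPrefixOf]
          exact fun hh => h hh.symm
        rw [hp]
        simp only [Bool.false_eq_true, if_false]
        rw [ih (c :: acc)]
        simp [h]

lemma replace_single (a b : Char) (l : List Char) :
    PySem.Chars.replace l [a] [b] = l.map (fun c => if c = a then b else c) := by
  rw [PySem.Chars.replace]
  simp only [List.isEmpty_cons, Bool.false_eq_true, if_false]
  exact go_single a b l []

-- a fold of single-character replaces is one map of the folded per-character function
lemma foldl_replace (fA fB : Int → Char) (is : List Int) (s : String) :
    (is.foldl (fun s i => PySem.Str.replace s (String.ofList [fA i]) (String.ofList [fB i])) s).toList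
      = s.toList.map (fun c => is.foldl (fun c i => if c = fA i then fB i else c) c) := by
  induction is generalizing s with
  | nil => simp
  | cons i t ih =>
      simp only [List.foldl_cons]
      rw [ih]
      have h1 : (PySem.Str.replace s (String.ofList [fA i]) (String.ofList [fB i])).toList
          = s.toList.map (fun c => if c = fA i then fB i else c) := by
        rw [PySem.Str.toList_replace, String.toList_ofList, String.toList_ofList]
        exact replace_single (fA i) (fB i) s.toList
      rw [h1, List.map_map]
      rfl

-- arithmetic facts about Char.ofNat on the BMP range
lemma toNat_ofNat_lt (m : Nat) (hm : m < 55296) : (Char.ofNat m).toNat = m := by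
  have h : Nat.isValidChar m := Or.inl hm
  simp [Char.ofNat, h, Char.toNat, Char.ofNatAux]

lemma eq_ofNat_iff (c : Char) (m : Nat) (hm : m < 55296) : (c = Char.ofNat m) ↔ c.toNat = m := by
  constructor
  · intro h; rw [h, toNat_ofNat_lt m hm]
  · intro h; rw [← h, Char.ofNat_toNat]

-- the per-character fold fires at most once: an uppercase char is lowered, anything else is untouched
lemma fold_core (is : List Int) (hb : ∀ i ∈ is, 0 ≤ i ∧ i ≤ 25) (c : Char) :
    is.foldl (fun c i => if c = Char.ofNat (65 + i).toNat then Char.ofNat (97 + i).toNat else c) c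
      = if (∃ i ∈ is, (c.toNat : Int) = 65 + i) then Char.ofNat (c.toNat + 32) else c := by
  induction is generalizing c with
  | nil => simp
  | cons i t ih =>
      obtain ⟨hi0, hi25⟩ := hb i (List.mem_cons_self)
      have hbt : ∀ j ∈ t, 0 ≤ j ∧ j ≤ 25 := fun j hj => hb j (List.mem_cons_of_mem _ hj)
      have hm : (65 + i).toNat < 55296 := by omega
      rw [List.foldl_cons]
      by_cases hc : c = Char.ofNat (65 + i).toNat
      · rw [if_pos hc]
        have hct : c.toNat = (65 + i).toNat := (eq_ofNat_iff c _ hm).mp hc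
        have hnew : (Char.ofNat (97 + i).toNat).toNat = (97 + i).toNat :=
          toNat_ofNat_lt _ (by omega)
        rw [ih hbt]
        have hnone : ¬ (∃ j ∈ t, ((Char.ofNat (97 + i).toNat).toNat : Int) = 65 + j) := by
          rintro ⟨j, hj, hje⟩
          have := hbt j hj
          rw [hnew] at hje
          omega
        rw [if_neg hnone, if_pos ⟨i, List.mem_cons_self, by omega⟩]
        congr 1
        omega
      · rw [if_neg hc]
        have hct : c.toNat ≠ (65 + i).toNat := fun h => hc ((eq_ofNat_iff c _ hm).mpr h)
        rw [ih hbt]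
        by_cases hex : ∃ j ∈ t, (c.toNat : Int) = 65 + j
        · rw [if_pos hex, if_pos (by obtain ⟨j, hj, hje⟩ := hex; exact ⟨j, List.mem_cons_of_mem _ hj, hje⟩)]
        · rw [if_neg hex, if_neg ?_]
          rintro ⟨j, hj, hje⟩
          rcases List.mem_cons.mp hj with h | h
          · subst h
            exact hct (by omega)
          · exact hex ⟨j, h, hje⟩

-- the 26 staged per-character steps compute exactly A's branch, for every character
lemma perChar (c : Char) :
    (PySem.List.pyRange 0 26 1).foldl
        (fun c i => if c = Char.ofNat (65 + i).toNat then Char.ofNat (97 + i).toNat else c) c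
      = (if 'A' ≤ c ∧ c ≤ 'Z' then Char.ofNat (c.toNat + 32) else c) := by
  rw [fold_core _ (fun i hi => by have := (PySem.List.mem_pyRange_one).mp hi; omega) c]
  have hiff : ('A' ≤ c ∧ c ≤ 'Z') ↔ (65 ≤ c.toNat ∧ c.toNat ≤ 90) := by
    simp only [Char.le_def, UInt32.le_iff_toNat_le]
    have h1 : 'A'.val.toNat = 65 := rfl
    have h2 : 'Z'.val.toNat = 90 := rfl
    have h3 : c.val.toNat = c.toNat := rfl
    rw [h1, h2, h3]
  have hex : (∃ i ∈ PySem.List.pyRange 0 26 1, (c.toNat : Int) = 65 + i) ↔ (65 ≤ c.toNat ∧ c.toNat ≤ 90) := by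
    constructor
    · rintro ⟨i, hi, he⟩
      have := (PySem.List.mem_pyRange_one).mp hi
      omega
    · intro h
      exact ⟨(c.toNat : Int) - 65, (PySem.List.mem_pyRange_one).mpr (by omega), by omega⟩
  by_cases h : 65 ≤ c.toNat ∧ c.toNat ≤ 90
  · rw [if_pos (hex.mpr h), if_pos (hiff.mpr h)]
  · rw [if_neg (fun hx => h (hex.mp hx)), if_neg (fun hx => h (hiff.mp hx))]

-- ===== VERDICT (by name: the statement is the Claim_ definition above) =====
set_option maxRecDepth 4000 in
theorem mettreEnMinuscule_spec : Claim_equal_mettreEnMinuscule := by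
  intro s _
  show mettreEnMinuscule s = mettreEnMinuscule_alt s
  unfold mettreEnMinuscule mettreEnMinuscule_alt
  have hfun : (fun (x : List Char) carac =>
      if 'A' ≤ carac ∧ carac ≤ 'Z' then x ++ [Char.ofNat (carac.toNat + 32)] else x ++ [carac])
    = fun (x : List Char) carac =>
      x ++ [if 'A' ≤ carac ∧ carac ≤ 'Z' then Char.ofNat (carac.toNat + 32) else carac] := by
    funext x c; split <;> rfl
  rw [hfun, PySem.List.foldl_append_singleton_eq_map, List.nil_append]
  have halt := foldl_replace (fun i => Char.ofNat (65 + i).toNat)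
      (fun i => Char.ofNat (97 + i).toNat) (PySem.List.pyRange 0 26 1) s
  have hmap : (List.foldl
        (fun s i =>
          PySem.Str.replace s (String.ofList [Char.ofNat (65 + i).toNat]) (String.ofList [Char.ofNat (97 + i).toNat]))
        s (PySem.List.pyRange 0 26 1)).toList
      = List.map (fun carac => if 'A' ≤ carac ∧ carac ≤ 'Z' then Char.ofNat (carac.toNat + 32) else carac) s.toList := by
    rw [halt]
    exact List.map_congr_left (fun c _ => perChar c)
  rw [← hmap]
  exact String.ofList_toList
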